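-- pv_equiv track=rewrite | github.com/GustavoLamb/estrutura-dados-uni | maratona/questao-b.py | inverte_niveis_arvore
-- ===== SOURCE A (Python) =====
-- def inverte_niveis_arvore(arvore_array):
--     def inverte_niveis_arvore(arvore_array, index):
--         if index < 0:
--             return arvore_array
--
--         index_direito = 2 * index + 2
--         index_esquerdo = 2 * index + 1
--
--         if index_direito < len(arvore_array) and index_esquerdo < len(arvore_array):
--             arvore_array[index_direito], arvore_array[index_esquerdo] = arvore_array[index_esquerdo], arvore_array[index_direito]
--
--         return inverte_niveis_arvore(arvore_array, index - 1)
--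
--     return inverte_niveis_arvore(arvore_array, len(arvore_array) - 1)
-- ===== SOURCE B (Python) =====
-- def inverte_niveis_arvore(arvore_array):
--     n = len(arvore_array)
--     return [arvore_array[j + 1] if j % 2 == 1 and j + 1 < n
--             else arvore_array[j] if j % 2 == 1
--             else arvore_array[0] if j == 0
--             else arvore_array[j - 1]
--             for j in range(n)]
-- ===== Notes on version B (the rewrite author's own statement) =====
-- stated objective: simpler
-- what changed: Replaces the downward accumulator-passing recursion with in-place sibling swaps by a single comprehension that builds the result directly: position j reads from its sibling index (j+1 for a left child whose sibling exists, j-1 for a right child) without any swapping or recursion.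
import Mathlib
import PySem

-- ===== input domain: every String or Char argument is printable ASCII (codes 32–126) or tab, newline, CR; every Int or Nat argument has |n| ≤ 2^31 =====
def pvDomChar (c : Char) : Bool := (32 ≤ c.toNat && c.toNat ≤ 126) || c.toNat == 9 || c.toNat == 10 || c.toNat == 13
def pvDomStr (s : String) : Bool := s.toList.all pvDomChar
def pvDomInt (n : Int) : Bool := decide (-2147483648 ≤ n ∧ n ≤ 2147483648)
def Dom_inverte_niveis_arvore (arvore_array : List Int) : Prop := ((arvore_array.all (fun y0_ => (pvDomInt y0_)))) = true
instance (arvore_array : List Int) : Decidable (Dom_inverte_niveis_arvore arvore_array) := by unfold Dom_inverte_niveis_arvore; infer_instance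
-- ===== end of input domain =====

-- B replaces A's downward recursion with in-place sibling swaps by one comprehension that
-- builds the result directly (objective: simpler). A mutates its argument in place; B does
-- not — the equivalence proved here is about the RETURN value only.

-- ===== PORT A =====
-- the inner recursive helper of A, recursion counter m = index + 1 (Python's index runs
-- len-1, len-2, …, -1; m = 0 is the 'index < 0' base case), so the recursion is structural;
-- branches and writes are A's: guard on both child indices, then the tuple swap as the two
-- List.set writes with the original values (indices are in range by the guard, so getD/set
-- are exact)
def invAux (arvore_array : List Int) : Nat → List Int
  | 0 => arvore_array
  | k + 1 =>
    -- index = k: index_direito = 2*k+2, index_esquerdo = 2*k+1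
    if 2 * k + 2 < arvore_array.length ∧ 2 * k + 1 < arvore_array.length then
      invAux ((arvore_array.set (2 * k + 2) (arvore_array.getD (2 * k + 1) 0)).set
        (2 * k + 1) (arvore_array.getD (2 * k + 2) 0)) k
    else invAux arvore_array k

def inverte_niveis_arvore (arvore_array : List Int) : List Int :=
  invAux arvore_array arvore_array.length

-- ===== PORT B =====
def inverte_niveis_arvore_alt (arvore_array : List Int) : List Int :=
  (List.range arvore_array.length).map (fun j =>
    if j % 2 = 1 ∧ j + 1 < arvore_array.length then arvore_array.getD (j + 1) 0
    else if j % 2 = 1 then arvore_array.getD j 0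
    else if j = 0 then arvore_array.getD 0 0
    else arvore_array.getD (j - 1) 0)

-- ===== PRECONDITION & SPEC =====
def Spec_inverte_niveis_arvore (arvore_array : List Int) (out : List Int) : Prop := out = inverte_niveis_arvore_alt arvore_array
instance (arvore_array : List Int) (out : List Int) : Decidable (Spec_inverte_niveis_arvore arvore_array out) := by unfold Spec_inverte_niveis_arvore; infer_instance

-- ===== CLAIM (what is proved, stated in full; the proofs are below) =====
def Claim_equal_inverte_niveis_arvore : Prop := ∀ (arvore_array : List Int), Dom_inverte_niveis_arvore arvore_array → Spec_inverte_niveis_arvore arvore_array (inverte_niveis_arvore arvore_array)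

-- ===== LEMMAS AND PROOFS =====

-- getD at provably equal indices
theorem getD_congr (l : List Int) (i i' : Nat) (h : i = i') : l.getD i 0 = l.getD i' 0 := by rw [h]

-- elementwise characterisation of A's recursion: after running invAux from index k-1 down,
-- position j holds its sibling's original value iff j has a parent below k and (for a left
-- child) its right sibling exists; lengths are preserved.
theorem invAux_char (k : Nat) : ∀ (a : List Int),
    (invAux a k).length = a.length ∧
    ∀ j, j < a.length →
      (invAux a k).getD j 0 =
        if 1 ≤ j ∧ (j - 1) / 2 < k ∧ (j % 2 = 0 ∨ j + 1 < a.length) then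
          (if j % 2 = 1 then a.getD (j + 1) 0 else a.getD (j - 1) 0)
        else a.getD j 0 := by
  induction k with
  | zero =>
    intro a
    simp [invAux]
  | succ k ih =>
    intro a
    show (invAux _ (k + 1)).length = _ ∧ _
    rw [invAux]
    by_cases hg : 2 * k + 2 < a.length ∧ 2 * k + 1 < a.length
    · rw [if_pos hg]
      set a' := (a.set (2 * k + 2) (a.getD (2 * k + 1) 0)).set (2 * k + 1) (a.getD (2 * k + 2) 0)
        with ha'
      have hlen : a'.length = a.length := by simp [ha']
      have hRlt : 2 * k + 2 < a.length := hg.1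
      have ha'get : ∀ j, a'.getD j 0 =
          if j = 2 * k + 1 then a.getD (2 * k + 2) 0
          else if j = 2 * k + 2 then a.getD (2 * k + 1) 0
          else a.getD j 0 := by
        intro j
        rw [ha']
        by_cases h1 : j = 2 * k + 1
        · subst h1
          rw [if_pos rfl]
          rw [List.getD_eq_getElem?_getD, List.getElem?_set_self (by simpa using by omega)]
          simp
        · rw [if_neg h1]
          rw [List.getD_eq_getElem?_getD, List.getElem?_set_ne (by omega)]
          by_cases h2 : j = 2 * k + 2
          · subst h2
            rw [if_pos rfl, List.getElem?_set_self (by omega)]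
            simp
          · rw [if_neg h2, List.getElem?_set_ne (by omega)]
            simp [List.getD_eq_getElem?_getD]
      obtain ⟨ihlen, ihget⟩ := ih a'
      refine ⟨by rw [ihlen, hlen], fun j hj => ?_⟩
      rw [ihget j (by rw [hlen]; exact hj), hlen]
      simp only [ha'get]
      clear ihget ihlen ha'get hlen hg ha'
      split_ifs <;> first | rfl | (apply getD_congr; omega)
    · rw [if_neg hg]
      obtain ⟨ihlen, ihget⟩ := ih a
      refine ⟨ihlen, fun j hj => ?_⟩
      rw [ihget j hj]
      have hno : ¬ (2 * k + 2 < a.length) := by omega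
      clear ihget ihlen hg
      split_ifs <;> first | rfl | (apply getD_congr; omega)

-- ===== VERDICT (by name: the statement is the Claim_ definition above) =====
theorem inverte_niveis_arvore_spec : Claim_equal_inverte_niveis_arvore := by
  intro a _
  show inverte_niveis_arvore a = inverte_niveis_arvore_alt a
  obtain ⟨hlen, hget⟩ := invAux_char a.length a
  unfold inverte_niveis_arvore inverte_niveis_arvore_alt
  apply List.ext_getElem
  · simpa using hlen
  · intro j hj hj'
    have hjlen : j < a.length := by simpa using hj'
    have h1 : (invAux a a.length)[j] = (invAux a a.length).getD j 0 := by
      rw [List.getD_eq_getElem?_getD, List.getElem?_eq_getElem hj]; rfl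
    rw [h1, hget j hjlen, List.getElem_map, List.getElem_range]
    clear hget hlen h1 hj hj'
    split_ifs <;> first | rfl | (apply getD_congr; omega)
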